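-- pv_equiv track=rewrite | github.com/Mistromy/Nirupama | code/utils/git_format.py | format_git_output
-- ===== SOURCE A (Python) =====
-- def format_git_output(raw_output):
--     lines = raw_output.splitlines()
--     summary = []
--     files = []
--     changes = []
--
--     for line in lines:
--         if line.startswith("Fast-forward") or line.startswith("Updating") or line.startswith("From "):
--             summary.append(line)
--         elif "|" in line:
--             parts = line.split("|")
--             filename = parts[0].strip()
--             stats = parts[1].strip()
--             plus_count = stats.count("+")
--             minus_count = stats.count("-")
--             numbers = [int(s) for s in stats.split() if s.isdigit()]
--             files.append(f"{filename}\n+ {plus_count}\n- {minus_count}")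
--         elif "changed" in line and ("insertion" in line or "deletion" in line):
--             changes.append(line)
--         else:
--             summary.append(line)
--
--     summary_block = "```shell\n" + "\n".join(summary) + "\n```" if summary else ""
--     files_block = "```diff\n" + "\n".join(files) + "\n```" if files else ""
--     changes_block = "```diff\n" + "\n".join(changes) + "\n```" if changes else ""
--     return summary_block + files_block + changes_block
-- ===== SOURCE B (Python) =====
-- def format_git_output(raw_output):
--     # Single backwards pass: walk the lines in reverse, prepending each line's
--     # rendered text onto one of three Optional-string buffers (None = empty
--     # bucket), so the joined bucket contents are built directly with no lists
--     # and no final join.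
--
--     def bucket_of(line):
--         if line.startswith(("Fast-forward", "Updating", "From ")):
--             return 0
--         if "|" in line:
--             return 1
--         if "changed" in line and ("insertion" in line or "deletion" in line):
--             return 2
--         return 0
--
--     def render(line):
--         name, stats = [p.strip() for p in line.split("|")[:2]]
--         return f"{name}\n+ {stats.count('+')}\n- {stats.count('-')}"
--
--     bufs = [None, None, None]
--     for line in reversed(raw_output.splitlines()):
--         k = bucket_of(line)
--         text = render(line) if k == 1 else line
--         bufs[k] = text if bufs[k] is None else text + "\n" + bufs[k]
--
--     def wrap(header, buf):
--         return "" if buf is None else header + buf + "\n```"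
--
--     return wrap("```shell\n", bufs[0]) + wrap("```diff\n", bufs[1]) + wrap("```diff\n", bufs[2])
-- ===== Notes on version B (the rewrite author's own statement) =====
-- stated objective: alternative
-- what changed: Replaces A's forward loop that appends lines into three lists and joins them at the end by a single backwards (reversed) pass that prepends each line's text onto three Optional-string buffers (None = empty bucket), building the joined block contents directly with no lists and no join; classification is a numeric bucket index instead of an elif chain over accumulators.
import Mathlib
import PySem

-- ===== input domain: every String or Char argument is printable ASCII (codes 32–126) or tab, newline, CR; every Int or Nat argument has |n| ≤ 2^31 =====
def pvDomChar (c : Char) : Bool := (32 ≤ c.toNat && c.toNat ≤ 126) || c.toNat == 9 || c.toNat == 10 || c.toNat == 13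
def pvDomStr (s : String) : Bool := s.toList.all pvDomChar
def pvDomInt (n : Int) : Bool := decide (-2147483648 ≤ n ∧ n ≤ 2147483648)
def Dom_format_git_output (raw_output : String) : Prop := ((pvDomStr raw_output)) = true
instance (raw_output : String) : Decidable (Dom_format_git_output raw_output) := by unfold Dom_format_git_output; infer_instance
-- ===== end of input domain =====

-- B replaces A's forward append-to-lists-then-join loop by a single backwards
-- pass prepending onto three Optional-string buffers; objective: alternative, same cost.

-- ===== PORT A =====
-- the f-string entry built for a line containing "|": parts[0]/parts[1] are in
-- range because "|" ∈ line, so the .getD "" defaults are never hit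
def pvFileEntry (line : String) : String :=
  let parts := (PySem.Str.split? line "|").getD []
  let filename := PySem.Str.strip ((PySem.List.pyGet? parts 0).getD "")
  let stats := PySem.Str.strip ((PySem.List.pyGet? parts 1).getD "")
  let plus_count : Int := PySem.Str.count stats "+"
  let minus_count : Int := PySem.Str.count stats "-"
  -- A computes `numbers` and never uses it; kept for faithfulness
  let _numbers := ((PySem.Str.split₀ stats).filter (fun s => PySem.Str.strIsdigit s)).map
      (fun s => (PySem.Int.ofStr? s).getD 0)
  filename ++ "\n+ " ++ PySem.Int.toStr plus_count ++ "\n- " ++ PySem.Int.toStr minus_count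

def pvFormatStep (st : List String × List String × List String) (line : String) :
    List String × List String × List String :=
  if PySem.Str.startswith line "Fast-forward" || PySem.Str.startswith line "Updating" ||
      PySem.Str.startswith line "From " then
    (st.1 ++ [line], st.2.1, st.2.2)
  else if PySem.Str.isIn "|" line then
    (st.1, st.2.1 ++ [pvFileEntry line], st.2.2)
  else if PySem.Str.isIn "changed" line &&
      (PySem.Str.isIn "insertion" line || PySem.Str.isIn "deletion" line) then
    (st.1, st.2.1, st.2.2 ++ [line])
  else
    (st.1 ++ [line], st.2.1, st.2.2)

def format_git_output (raw_output : String) : String :=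
  let lines := PySem.Str.splitlines raw_output
  let st := lines.foldl pvFormatStep ([], [], [])
  let summary := st.1
  let files := st.2.1
  let changes := st.2.2
  let summary_block := if summary.isEmpty then "" else
    "```shell\n" ++ PySem.Str.join "\n" summary ++ "\n```"
  let files_block := if files.isEmpty then "" else
    "```diff\n" ++ PySem.Str.join "\n" files ++ "\n```"
  let changes_block := if changes.isEmpty then "" else
    "```diff\n" ++ PySem.Str.join "\n" changes ++ "\n```"
  summary_block ++ files_block ++ changes_block

-- ===== PORT B =====
def pvBucket (line : String) : Nat :=
  if PySem.Str.startswith line "Fast-forward" || PySem.Str.startswith line "Updating" ||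
      PySem.Str.startswith line "From " then 0
  else if PySem.Str.isIn "|" line then 1
  else if PySem.Str.isIn "changed" line &&
      (PySem.Str.isIn "insertion" line || PySem.Str.isIn "deletion" line) then 2
  else 0

def pvRender (line : String) : String :=
  let parts := (PySem.List.slice ((PySem.Str.split? line "|").getD []) none (some 2)).map PySem.Str.strip
  let name := (PySem.List.pyGet? parts 0).getD ""
  let stats := (PySem.List.pyGet? parts 1).getD ""
  name ++ "\n+ " ++ PySem.Int.toStr (PySem.Str.count stats "+") ++ "\n- " ++
    PySem.Int.toStr (PySem.Str.count stats "-")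

def pvPrep (t : String) (o : Option String) : Option String :=
  some (match o with | none => t | some r => t ++ "\n" ++ r)

def pvStepB (st : Option String × Option String × Option String) (line : String) :
    Option String × Option String × Option String :=
  let k := pvBucket line
  let text := if k == 1 then pvRender line else line
  if k == 0 then (pvPrep text st.1, st.2.1, st.2.2)
  else if k == 1 then (st.1, pvPrep text st.2.1, st.2.2)
  else (st.1, st.2.1, pvPrep text st.2.2)

def pvWrap (header : String) (o : Option String) : String :=
  match o with
  | none => ""
  | some t => header ++ t ++ "\n```"

def format_git_output_alt (raw_output : String) : String :=
  let lines := PySem.Str.splitlines raw_output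
  let st := lines.reverse.foldl pvStepB (none, none, none)
  pvWrap "```shell\n" st.1 ++ pvWrap "```diff\n" st.2.1 ++ pvWrap "```diff\n" st.2.2

-- ===== PRECONDITION & SPEC =====
def Spec_format_git_output (raw_output : String) (out : String) : Prop := out = format_git_output_alt raw_output
instance (raw_output : String) (out : String) : Decidable (Spec_format_git_output raw_output out) := by unfold Spec_format_git_output; infer_instance

-- ===== CLAIM (what is proved, stated in full; the proofs are below) =====
def Claim_equal_format_git_output : Prop := ∀ (raw_output : String), Dom_format_git_output raw_output → Spec_format_git_output raw_output (format_git_output raw_output)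

-- ===== LEMMAS AND PROOFS =====
def pvIsSummary (line : String) : Bool :=
  PySem.Str.startswith line "Fast-forward" || PySem.Str.startswith line "Updating" ||
    PySem.Str.startswith line "From "

def pvIsFile (line : String) : Bool :=
  !pvIsSummary line && PySem.Str.isIn "|" line

def pvIsChange (line : String) : Bool :=
  !pvIsSummary line && !PySem.Str.isIn "|" line && PySem.Str.isIn "changed" line &&
    (PySem.Str.isIn "insertion" line || PySem.Str.isIn "deletion" line)

lemma pvFileEntry_eq_pvRender (line : String) : pvFileEntry line = pvRender line := by
  unfold pvFileEntry pvRender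
  cases h : (PySem.Str.split? line "|").getD [] with
  | nil =>
    simp [PySem.List.slice, PySem.List.pyGet?, PySem.List.pyIdx?, PySem.Str.strip,
      PySem.Chars.strip, PySem.Chars.lstrip, PySem.Chars.rstrip]
  | cons a t =>
    cases t with
    | nil =>
      simp [PySem.List.slice, PySem.List.pyGet?, PySem.List.pyIdx?, PySem.Str.strip,
        PySem.Chars.strip]
    | cons b t' =>
      have h0 : (0 : Int) ≤ (t'.length : Int) + 1 := by positivity
      simp [PySem.List.slice, PySem.List.pyGet?, PySem.List.pyIdx?, h0]

lemma pvFoldl_formatStep (ls : List String) (s f c : List String) :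
    ls.foldl pvFormatStep (s, f, c) =
      (s ++ ls.filter (fun l => !pvIsFile l && !pvIsChange l),
       f ++ (ls.filter pvIsFile).map pvRender,
       c ++ ls.filter pvIsChange) := by
  induction ls generalizing s f c with
  | nil => simp
  | cons l ls ih =>
    simp only [List.foldl_cons]
    rw [ih]
    cases h1 : PySem.Str.startswith l "Fast-forward" <;>
    cases h2 : PySem.Str.startswith l "Updating" <;>
    cases h3 : PySem.Str.startswith l "From " <;>
    cases h4 : PySem.Str.isIn "|" l <;>
    cases h5 : PySem.Str.isIn "changed" l <;>
    cases h6 : PySem.Str.isIn "insertion" l <;>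
    cases h7 : PySem.Str.isIn "deletion" l <;>
    simp_all [pvFormatStep, pvIsSummary, pvIsFile, pvIsChange,
      pvFileEntry_eq_pvRender]

def pvOptJoin (l : List String) : Option String :=
  if l.isEmpty then none else some (PySem.Str.join "\n" l)

lemma pvJoin_cons (t : String) (xs : List String) (h : xs ≠ []) :
    PySem.Str.join "\n" (t :: xs) = t ++ "\n" ++ PySem.Str.join "\n" xs := by
  cases xs with
  | nil => exact absurd rfl h
  | cons a l =>
    have hc : ∀ cs : List Char, String.ofList ('\n' :: cs) = "\n" ++ String.ofList cs := by
      intro cs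
      rw [show ('\n' :: cs) = ['\n'] ++ cs from rfl, String.ofList_append]
    simp [PySem.Str.join, PySem.Chars.join_cons_cons, hc, String.append_assoc]

lemma pvPrep_optJoin (t : String) (xs : List String) :
    pvPrep t (pvOptJoin xs) = pvOptJoin (t :: xs) := by
  cases xs with
  | nil => simp [pvPrep, pvOptJoin, PySem.Str.join]
  | cons a l => simp [pvPrep, pvOptJoin, pvJoin_cons t (a :: l) (by simp)]

lemma pvStepB_file (st : Option String × Option String × Option String) (l : String)
    (h : pvIsFile l = true) :
    pvStepB st l = (st.1, pvPrep (pvRender l) st.2.1, st.2.2) := by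
  unfold pvIsFile pvIsSummary at h
  unfold pvStepB pvBucket
  simp_all

lemma pvStepB_change (st : Option String × Option String × Option String) (l : String)
    (h : pvIsChange l = true) :
    pvStepB st l = (st.1, st.2.1, pvPrep l st.2.2) := by
  unfold pvIsChange pvIsSummary at h
  unfold pvStepB pvBucket
  simp_all

lemma pvStepB_summary (st : Option String × Option String × Option String) (l : String)
    (h1 : pvIsFile l = false) (h2 : pvIsChange l = false) :
    pvStepB st l = (pvPrep l st.1, st.2.1, st.2.2) := by
  have hb : pvBucket l = 0 := by
    unfold pvIsFile pvIsSummary at h1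
    unfold pvIsChange pvIsSummary at h2
    unfold pvBucket
    cases hs : (PySem.Str.startswith l "Fast-forward" || PySem.Str.startswith l "Updating" ||
        PySem.Str.startswith l "From ") with
    | true => simp
    | false => simp_all
  unfold pvStepB
  rw [hb]
  simp

lemma pvFoldl_stepB (ls : List String) :
    ls.reverse.foldl pvStepB (none, none, none) =
      (pvOptJoin (ls.filter (fun l => !pvIsFile l && !pvIsChange l)),
       pvOptJoin ((ls.filter pvIsFile).map pvRender),
       pvOptJoin (ls.filter pvIsChange)) := by
  induction ls with
  | nil => simp [pvOptJoin]
  | cons l ls ih =>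
    rw [List.reverse_cons, List.foldl_append]
    simp only [List.foldl_cons, List.foldl_nil, ih]
    by_cases hf : pvIsFile l = true
    · have hc : pvIsChange l = false := by
        unfold pvIsFile at hf; unfold pvIsChange
        rcases Bool.and_eq_true_iff.1 hf with ⟨_, h⟩
        simp_all
      rw [pvStepB_file _ _ hf]
      simp [hf, hc, pvPrep_optJoin]
    · simp only [Bool.not_eq_true] at hf
      by_cases hc : pvIsChange l = true
      · rw [pvStepB_change _ _ hc]
        simp [hf, hc, pvPrep_optJoin]
      · simp only [Bool.not_eq_true] at hc
        rw [pvStepB_summary _ _ hf hc]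
        simp [hf, hc, pvPrep_optJoin]

lemma pvBlock_eq_wrap (hdr : String) (l : List String) :
    (if l.isEmpty then "" else hdr ++ PySem.Str.join "\n" l ++ "\n```") =
      pvWrap hdr (pvOptJoin l) := by
  cases l <;> simp [pvWrap, pvOptJoin]

-- ===== VERDICT (by name: the statement is the Claim_ definition above) =====
theorem format_git_output_spec : Claim_equal_format_git_output := by
  intro raw _
  show format_git_output raw = format_git_output_alt raw
  simp only [format_git_output, format_git_output_alt, pvFoldl_formatStep, pvFoldl_stepB,
    List.nil_append, pvBlock_eq_wrap]
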